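-- pv_equiv track=rewrite | github.com/bilizmo1/Algorithms | Problems/zad1/kol1.py | finder_one
-- ===== SOURCE A (Python) =====
-- def finder_one(T):
--     n = len(T)
--     max_rank = 0
--     for i in range(1,n):
--         counter = 0
--         for j in range(i):
--             if T[j] < T[i]:
--                 counter += 1
--         if counter > max_rank:
--             max_rank = counter
--     return max_rank
-- ===== SOURCE B (Python) =====
-- def finder_one(T):
--     # Maintain a sorted list of the elements seen so far; for each new element,
--     # a binary search gives the number of earlier smaller elements directly.
--     S = []
--     best = 0
--     for x in T:
--         lo = 0
--         hi = len(S)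
--         while lo < hi:
--             mid = (lo + hi) // 2
--             if S[mid] < x:
--                 lo = mid + 1
--             else:
--                 hi = mid
--         if lo > best:
--             best = lo
--         S.insert(lo, x)
--     return best
-- ===== Notes on version B (the rewrite author's own statement) =====
-- stated objective: faster
-- what changed: Replaces A's nested rescan of the whole prefix for every element by a single pass that keeps the already-seen elements in a sorted list and finds each element's count of earlier smaller elements with a hand-written binary search (bisect_left) before inserting it.
import Mathlib
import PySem

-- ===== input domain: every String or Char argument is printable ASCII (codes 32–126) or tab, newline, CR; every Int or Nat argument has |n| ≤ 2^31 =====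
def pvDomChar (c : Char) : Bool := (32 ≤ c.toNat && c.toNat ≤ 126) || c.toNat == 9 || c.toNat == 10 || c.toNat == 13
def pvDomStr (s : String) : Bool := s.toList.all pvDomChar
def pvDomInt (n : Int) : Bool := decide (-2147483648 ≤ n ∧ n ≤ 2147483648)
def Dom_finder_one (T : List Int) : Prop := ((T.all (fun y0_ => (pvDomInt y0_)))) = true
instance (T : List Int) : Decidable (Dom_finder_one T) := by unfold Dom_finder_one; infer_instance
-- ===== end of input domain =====

-- B replaces A's quadratic rescan of the whole prefix by a sorted list kept with
-- binary search, so each element's "earlier smaller" count is one bisect (faster).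

-- ===== PORT A =====
def finder_one (T : List Int) : Int :=
  let n : Int := PySem.List.len T
  (PySem.List.pyRange 1 n 1).foldl (fun max_rank i =>
    let counter : Int := (PySem.List.pyRange 0 i 1).foldl (fun counter j =>
      if PySem.List.pyGetD T j 0 < PySem.List.pyGetD T i 0 then counter + 1 else counter) 0
    if counter > max_rank then counter else max_rank) 0

-- ===== PORT B =====
-- the 'while lo < hi' bisect loop of Source B; lo and hi stay nonnegative in Python, so Nat
-- with Nat division matches Python's // exactly here; the fuel argument only makes the
-- loop structurally recursive (hi - lo shrinks by at least 1 per iteration)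
def bisectGo (S : List Int) (x : Int) : Nat → Nat → Nat → Nat
  | 0, lo, _hi => lo
  | fuel + 1, lo, hi =>
    if lo < hi then
      let mid := (lo + hi) / 2
      if PySem.List.pyGetD S (mid : Int) 0 < x then bisectGo S x fuel (mid + 1) hi
      else bisectGo S x fuel lo mid
    else lo

def bisectLoop (S : List Int) (x : Int) (lo hi : Nat) : Nat :=
  bisectGo S x (hi - lo) lo hi

-- one iteration of Source B's 'for x in T' loop over the state (S, best)
def bStep (st : List Int × Int) (x : Int) : List Int × Int :=
  let S := st.1
  let best := st.2
  let lo := bisectLoop S x 0 S.length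
  let best' : Int := if (lo : Int) > best then (lo : Int) else best
  (PySem.List.insert S (lo : Int) x, best')

def finder_one_alt (T : List Int) : Int :=
  (T.foldl bStep ([], 0)).2

-- ===== PRECONDITION & SPEC =====
def Spec_finder_one (T : List Int) (out : Int) : Prop := out = finder_one_alt T
instance (T : List Int) (out : Int) : Decidable (Spec_finder_one T out) := by unfold Spec_finder_one; infer_instance

-- ===== CLAIM (what is proved, stated in full; the proofs are below) =====
def Claim_equal_finder_one : Prop := ∀ (T : List Int), Dom_finder_one T → Spec_finder_one T (finder_one T)

-- ===== LEMMAS AND PROOFS =====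

-- number of elements of P smaller than x
def cnt (P : List Int) (x : Int) : Nat := P.countP (fun y => decide (y < x))

-- common reference semantics: running max of "smaller elements in the prefix seen so far"
def specC : List Int → List Int → Int → Int
  | [], _, best => best
  | x :: t, P, best => specC t (P ++ [x]) (max best (cnt P x))

lemma cnt_le_length (P : List Int) (x : Int) : cnt P x ≤ P.length := by
  unfold cnt; exact List.countP_le_length

-- ---- A side ----

lemma counter_eq (T : List Int) (i : Nat) (h : i ≤ T.length) (v : Int) :
    (PySem.List.pyRange 0 (i : Int) 1).foldl
      (fun c j => if PySem.List.pyGetD T j 0 < v then c + 1 else c) (0 : Int)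
    = (cnt (T.take i) v : Int) := by
  have hcongr : (PySem.List.pyRange 0 (i : Int) 1).foldl
      (fun c j => if PySem.List.pyGetD T j 0 < v then c + 1 else c) (0 : Int)
      = (PySem.List.pyRange 0 (i : Int) 1).foldl
      (fun c j => if PySem.List.pyGetD (T.take i) j 0 < v then c + 1 else c) (0 : Int) := by
    apply PySem.List.foldl_congr_mem
    intro acc j hj
    rw [PySem.List.mem_pyRange_one] at hj
    have hj' : j = ((j.toNat : Nat) : Int) := by omega
    rw [hj', PySem.List.pyGetD_natCast, PySem.List.pyGetD_natCast]
    have h1 : j.toNat < T.length := by omega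
    have h2 : j.toNat < (T.take i).length := by simp; omega
    rw [List.getD_eq_getElem T 0 h1, List.getD_eq_getElem (T.take i) 0 h2,
        List.getElem_take]
  rw [hcongr]
  have hlen : (i : Int) = ((T.take i).length : Int) := by simp [List.length_take]; omega
  rw [hlen, PySem.List.foldl_pyRange_zero_pyGetD' (T.take i) 0
      (fun c y => if y < v then c + 1 else c) 0]
  rw [PySem.List.foldl_ite_add_one (fun y => y < v)]
  simp [cnt]

lemma specC_eq (t : List Int) : ∀ (P : List Int) (best : Int),
    specC t P best
    = (List.range t.length).foldl
        (fun b k => max b ((cnt (P ++ t.take k) (t.getD k 0) : Int))) best := by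
  induction t with
  | nil => intro P best; simp [specC]
  | cons x r ih =>
    intro P best
    simp only [specC]
    rw [ih, List.length_cons, List.range_succ_eq_map, List.foldl_cons, List.foldl_map]
    simp only [List.take_zero, List.append_nil, List.getD_cons_zero, List.take_succ_cons,
      List.getD_cons_succ, List.append_assoc, List.singleton_append]

lemma finder_one_eq_specC (T : List Int) : finder_one T = specC T [] 0 := by
  unfold finder_one
  simp only [PySem.List.len_eq]
  have hstep : (PySem.List.pyRange 1 (T.length : Int) 1).foldl
      (fun max_rank i =>
        let counter : Int := (PySem.List.pyRange 0 i 1).foldl (fun counter j =>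
          if PySem.List.pyGetD T j 0 < PySem.List.pyGetD T i 0 then counter + 1 else counter) 0
        if counter > max_rank then counter else max_rank) (0 : Int)
      = (PySem.List.pyRange 1 (T.length : Int) 1).foldl
      (fun b i => max b ((cnt (T.take i.toNat) (T.getD i.toNat 0) : Nat) : Int)) (0 : Int) := by
    apply PySem.List.foldl_congr_mem
    intro acc i hi
    rw [PySem.List.mem_pyRange_one] at hi
    obtain ⟨k, rfl⟩ : ∃ k : Nat, i = (k : Int) := ⟨i.toNat, by omega⟩
    have hlt : k ≤ T.length := by omega
    simp only
    rw [PySem.List.pyGetD_natCast, counter_eq T k hlt]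
    simp only [Int.toNat_natCast]
    rcases le_or_gt ((cnt (T.take k) (T.getD k 0) : Int)) acc with h | h
    · rw [if_neg (by omega), max_eq_left h]
    · rw [if_pos (by omega), max_eq_right (by omega)]
  rw [hstep, specC_eq T [], PySem.List.pyRange_one]
  rw [List.foldl_map]
  cases T with
  | nil => simp
  | cons a t =>
    simp only [List.length_cons, List.nil_append]
    rw [List.range_succ_eq_map, List.foldl_cons, List.foldl_map]
    have h1 : ((((t.length + 1 : Nat)) : Int) - 1).toNat = t.length := by omega
    rw [h1]
    have hz : max (0 : Int) ((cnt ((a :: t).take 0) ((a :: t).getD 0 0) : Int)) = 0 := by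
      simp [cnt]
    rw [hz]
    apply PySem.List.foldl_congr_mem
    intro acc k hk
    have h3 : ((1 : Int) + (k : Int)).toNat = k + 1 := by omega
    rw [h3]

-- ---- B side ----

lemma key_lemma (x : Int) : ∀ (S : List Int), S.Pairwise (· ≤ ·) →
    ∀ k (hk : k < S.length), (S[k] < x ↔ k < cnt S x) := by
  intro S
  induction S with
  | nil => intro _ k hk; simp at hk
  | cons a t ih =>
    intro hp k hk
    have hpt : t.Pairwise (· ≤ ·) := hp.of_cons
    have hall : ∀ y ∈ t, a ≤ y := fun y hy => List.rel_of_pairwise_cons hp hy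
    by_cases hax : a < x
    · have hc : cnt (a :: t) x = cnt t x + 1 := by
        simp [cnt, hax]
      cases k with
      | zero => simpa [hc] using hax
      | succ m =>
        have hm : m < t.length := by simpa using hk
        have := ih hpt m hm
        simp only [List.getElem_cons_succ, hc]
        omega
    · have ht0 : cnt t x = 0 := by
        unfold cnt
        rw [List.countP_eq_zero]
        intro y hy
        have hay : a ≤ y := hall y hy
        simp only [decide_eq_true_eq]
        omega
      have hc : cnt (a :: t) x = 0 := by
        unfold cnt at ht0 ⊢
        rw [List.countP_cons, ht0]
        simp [hax]
      rw [hc]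
      cases k with
      | zero => simpa using hax
      | succ m =>
        have hm : m < t.length := by simpa using hk
        have hy : x ≤ t[m] := by
          have : a ≤ t[m] := hall _ (List.getElem_mem hm)
          omega
        simp only [List.getElem_cons_succ]
        omega

lemma bisect_correct (S : List Int) (x : Int)
    (hkey : ∀ k (hk : k < S.length), (S[k] < x ↔ k < cnt S x)) :
    ∀ (d lo hi : Nat), hi - lo ≤ d → lo ≤ cnt S x → cnt S x ≤ hi → hi ≤ S.length →
    bisectGo S x d lo hi = cnt S x := by
  intro d
  induction d with
  | zero =>
    intro lo hi hd hlo hhi hlen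
    show lo = cnt S x
    omega
  | succ n ih =>
    intro lo hi hd hlo hhi hlen
    show (if lo < hi then
        (let mid := (lo + hi) / 2
         if PySem.List.pyGetD S (mid : Int) 0 < x then bisectGo S x n (mid + 1) hi
         else bisectGo S x n lo mid)
      else lo) = cnt S x
    by_cases h : lo < hi
    · rw [if_pos h]
      have hmidlt : (lo + hi) / 2 < S.length := by omega
      show (if PySem.List.pyGetD S (((lo + hi) / 2 : Nat) : Int) 0 < x then
          bisectGo S x n ((lo + hi) / 2 + 1) hi else bisectGo S x n lo ((lo + hi) / 2))
          = cnt S x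
      rw [PySem.List.pyGetD_natCast, List.getD_eq_getElem S 0 hmidlt]
      have hiff := hkey ((lo + hi) / 2) hmidlt
      by_cases hlt : S[(lo + hi) / 2] < x
      · rw [if_pos hlt]
        exact ih ((lo + hi) / 2 + 1) hi (by omega) (by omega) hhi hlen
      · rw [if_neg hlt]
        have : ¬ ((lo + hi) / 2 < cnt S x) := by rw [← hiff]; exact hlt
        exact ih lo ((lo + hi) / 2) (by omega) hlo (by omega) (by omega)
    · rw [if_neg h]; omega

lemma insert_at_cnt (S : List Int) (x : Int) (c : Nat) (hc : c ≤ S.length) :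
    PySem.List.insert S (c : Int) x = S.take c ++ x :: S.drop c := by
  rw [PySem.List.insert_natCast]
  exact hc

lemma sorted_insert (S : List Int) (x : Int) (hp : S.Pairwise (· ≤ ·)) :
    (S.take (cnt S x) ++ x :: S.drop (cnt S x)).Pairwise (· ≤ ·) := by
  have hkey := key_lemma x S hp
  have hc := cnt_le_length S x
  have htake : ∀ a ∈ S.take (cnt S x), a < x := by
    intro a ha
    rw [List.mem_take_iff_getElem] at ha
    obtain ⟨k, hk, rfl⟩ := ha
    exact (hkey k (by omega)).2 (by omega)
  have hdrop : ∀ b ∈ S.drop (cnt S x), x ≤ b := by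
    intro b hb
    rw [List.mem_drop_iff_getElem] at hb
    obtain ⟨k, hk, rfl⟩ := hb
    have := hkey (cnt S x + k) (by omega)
    omega
  rw [List.pairwise_append]
  refine ⟨hp.sublist (List.take_sublist _ _), ?_, ?_⟩
  · rw [List.pairwise_cons]
    exact ⟨hdrop, hp.sublist (List.drop_sublist _ _)⟩
  · intro a ha b hb
    rcases List.mem_cons.mp hb with rfl | hb
    · exact le_of_lt (htake a ha)
    · exact le_trans (le_of_lt (htake a ha)) (hdrop b hb)

lemma bFold_eq (t : List Int) : ∀ (S P : List Int) (best : Int),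
    S.Perm P → S.Pairwise (· ≤ ·) →
    (t.foldl bStep (S, best)).2 = specC t P best := by
  induction t with
  | nil => intro S P best _ _; simp [specC]
  | cons x r ih =>
    intro S P best hperm hp
    have hkey := key_lemma x S hp
    have hc := cnt_le_length S x
    have hlo : bisectLoop S x 0 S.length = cnt S x := by
      unfold bisectLoop
      exact bisect_correct S x hkey (S.length - 0) 0 S.length (by omega) (by omega) hc le_rfl
    have hcP : cnt S x = cnt P x := by
      unfold cnt; exact hperm.countP_eq _
    have hstep : bStep (S, best) x
        = (S.take (cnt S x) ++ x :: S.drop (cnt S x), max best ((cnt P x : Nat) : Int)) := by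
      unfold bStep
      simp only [hlo]
      rw [insert_at_cnt S x _ hc]
      congr 1
      rw [← hcP]
      rcases le_or_gt ((cnt S x : Int)) best with h | h
      · rw [if_neg (by omega), max_eq_left h]
      · rw [if_pos (by omega), max_eq_right (by omega)]
    simp only [List.foldl_cons, hstep, specC]
    apply ih
    · have h1 : (S.take (cnt S x) ++ x :: S.drop (cnt S x)).Perm (x :: S) := by
        have h2 := List.perm_middle (a := x) (l₁ := S.take (cnt S x)) (l₂ := S.drop (cnt S x))
        simpa [List.take_append_drop] using h2
      exact h1.trans ((hperm.cons x).trans (List.perm_append_singleton x P).symm)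
    · exact sorted_insert S x hp

-- ===== VERDICT (by name: the statement is the Claim_ definition above) =====
theorem finder_one_spec : Claim_equal_finder_one := by
  intro T _
  unfold Spec_finder_one
  rw [finder_one_eq_specC]
  unfold finder_one_alt
  rw [bFold_eq T [] [] 0 (List.Perm.refl _) List.Pairwise.nil]
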